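-- pv_equiv track=rewrite | github.com/USnark772/CodePractice | hackerearth/Algorithms/LinearSearch/EasySumSetProblem/easy_sum_set_problem.py | calculate
-- ===== SOURCE A (Python) =====
-- def calculate(n: int, m: int, a: list, c: list) -> list:
--     """
--     Calculate the set B from the sets A and C.
--     First find range of set B using largest and smallest values in A and C.
--     Second test each number in range to see if valid value for B.
--     :param n: The number of elements in a.
--     :param m: The number of elements in c.
--     :param a: The set A.
--     :param c: The set C.
--     :return list: The sorted set B.
--
--     >>> calculate(2, 3, [1, 2], [3, 4, 5])
--     {2, 3}
--     """
--     ret = set()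
--     biggest = abs(max(a) - max(c))
--     smallest = abs(min(a) - min(c))
--     ret.add(smallest)
--     ret.add(biggest)
--     for i in range(smallest + 1, biggest):
--         passes = True
--         for e in a:
--             if not i + e in c:
--                 passes = False
--         if passes:
--             ret.add(i)
--     return sorted(ret)
-- ===== SOURCE B (Python) =====
-- def calculate(n: int, m: int, a: list, c: list) -> list:
--     cs = set(c)
--     smallest = abs(min(a) - min(c))
--     biggest = abs(max(a) - max(c))
--     # candidates b with b + a[0] in C, intersected with the conditions for the rest of a
--     cand = {x - a[0] for x in c}
--     for e in a[1:]:
--         cand = {b for b in cand if b + e in cs}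
--     res = {smallest, biggest}
--     for b in cand:
--         if smallest < b < biggest:
--             res.add(b)
--     return sorted(res)
-- ===== Notes on version B (the rewrite author's own statement) =====
-- stated objective: alternative
-- what changed: Instead of testing every integer in the range [smallest+1, biggest) with a nested scan over a and a linear 'in c' lookup, B derives the candidate set {x - a[0] : x in C} once, intersects it with the condition b+e in set(C) for each remaining e in a, then filters to the open range and adds the two boundary values.
import Mathlib
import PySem

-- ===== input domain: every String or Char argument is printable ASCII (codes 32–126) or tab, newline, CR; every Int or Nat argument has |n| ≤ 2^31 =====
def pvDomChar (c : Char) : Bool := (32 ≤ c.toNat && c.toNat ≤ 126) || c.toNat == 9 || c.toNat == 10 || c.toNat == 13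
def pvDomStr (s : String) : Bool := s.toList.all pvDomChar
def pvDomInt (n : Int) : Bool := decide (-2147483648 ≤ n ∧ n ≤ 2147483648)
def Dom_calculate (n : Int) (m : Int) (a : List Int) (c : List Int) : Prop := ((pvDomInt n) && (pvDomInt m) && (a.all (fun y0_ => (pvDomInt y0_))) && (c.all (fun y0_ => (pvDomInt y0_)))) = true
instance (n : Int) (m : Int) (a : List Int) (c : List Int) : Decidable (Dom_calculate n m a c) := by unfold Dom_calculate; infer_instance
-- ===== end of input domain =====

-- B replaces A's scan of every integer in [smallest+1, biggest) by a set intersection over candidates derived from C (a different algorithm, not claimed faster).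

-- ===== PORT A =====
def calculate (n : Int) (m : Int) (a : List Int) (c : List Int) : List Int :=
  match PySem.List.max? a (fun x => x), PySem.List.max? c (fun x => x),
        PySem.List.min? a (fun x => x), PySem.List.min? c (fun x => x) with
  | some maxA, some maxC, some minA, some minC =>
    let biggest := |maxA - maxC|
    let smallest := |minA - minC|
    let ret : PySem.Set Int := PySem.Set.add (PySem.Set.add PySem.Set.empty smallest) biggest
    let ret := (PySem.List.pyRange (smallest + 1) biggest 1).foldl
      (fun r i =>
        let passes := a.foldl (fun p e => if ¬ ((i + e) ∈ c) then false else p) true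
        if passes then PySem.Set.add r i else r) ret
    PySem.List.sorted ret (fun x => x) false
  | _, _, _, _ => []      -- unreachable under Pre_ (max/min of an empty list raises in Python)

-- ===== PORT B =====
def calculate_alt (n : Int) (m : Int) (a : List Int) (c : List Int) : List Int :=
  match a, c with
  | a0 :: arest, c0 :: crest =>
    let cs : PySem.Set Int := PySem.Set.ofList c
    let smallest := |arest.foldl min a0 - crest.foldl min c0|
    let biggest := |arest.foldl max a0 - crest.foldl max c0|
    let cand : PySem.Set Int :=
      arest.foldl (fun cd e => cd.filter (fun b => decide ((b + e) ∈ cs)))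
        (PySem.Set.ofList (c.map (fun x => x - a0)))
    let res : PySem.Set Int :=
      cand.foldl (fun r b => if smallest < b ∧ b < biggest then PySem.Set.add r b else r)
        (PySem.Set.add (PySem.Set.add PySem.Set.empty smallest) biggest)
    PySem.List.sorted res (fun x => x) false
  | _, _ => []   -- unreachable under Pre_ (min/max of an empty list raises in Python)

-- ===== PRECONDITION & SPEC =====
-- Pre_ excludes exactly the inputs where Python's max()/min() of an empty list raises ValueError in A.
def Pre_calculate (n : Int) (m : Int) (a : List Int) (c : List Int) : Prop := a ≠ [] ∧ c ≠ []
instance (n : Int) (m : Int) (a : List Int) (c : List Int) : Decidable (Pre_calculate n m a c) := by unfold Pre_calculate; infer_instance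
def pvWitness_calculate : Int × Int × List Int × List Int := (2, 3, [1, 2], [3, 4, 5])
def Spec_calculate (n : Int) (m : Int) (a : List Int) (c : List Int) (out : List Int) : Prop := out = calculate_alt n m a c
instance (n : Int) (m : Int) (a : List Int) (c : List Int) (out : List Int) : Decidable (Spec_calculate n m a c out) := by unfold Spec_calculate; infer_instance

-- ===== CLAIM (what is proved, stated in full; the proofs are below) =====
def Claim_equal_calculate : Prop := ∀ (n : Int) (m : Int) (a : List Int) (c : List Int), Dom_calculate n m a c → Pre_calculate n m a c → Spec_calculate n m a c (calculate n m a c)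

-- ===== LEMMAS AND PROOFS =====

theorem nodup_foldl_add (l : List Int) (p : Int → Prop) [DecidablePred p] (init : List Int)
    (h : init.Nodup) :
    (l.foldl (fun r i => if p i then PySem.Set.add r i else r) init).Nodup := by
  induction l generalizing init with
  | nil => simpa
  | cons x t ih =>
    simp only [List.foldl_cons]
    split
    · exact ih _ (PySem.Set.nodup_add _ _ h)
    · exact ih _ h

theorem mem_foldl_add (l : List Int) (p : Int → Prop) [DecidablePred p] (init : List Int)
    (x : Int) :
    x ∈ l.foldl (fun r i => if p i then PySem.Set.add r i else r) init ↔
      x ∈ init ∨ (x ∈ l ∧ p x) := by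
  induction l generalizing init with
  | nil => simp
  | cons y t ih =>
    simp only [List.foldl_cons, List.mem_cons]
    split
    · rename_i hy
      rw [ih, PySem.Set.mem_add]
      constructor
      · rintro ((hl | rfl) | hr)
        · exact Or.inl hl
        · exact Or.inr ⟨Or.inl rfl, hy⟩
        · exact Or.inr ⟨Or.inr hr.1, hr.2⟩
      · rintro (hl | ⟨rfl | hl, hp⟩)
        · exact Or.inl (Or.inl hl)
        · exact Or.inl (Or.inr rfl)
        · exact Or.inr ⟨hl, hp⟩
    · rename_i hy
      rw [ih]
      constructor
      · rintro (hl | hr)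
        · exact Or.inl hl
        · exact Or.inr ⟨Or.inr hr.1, hr.2⟩
      · rintro (hl | ⟨rfl | hl, hp⟩)
        · exact Or.inl hl
        · exact absurd hp hy
        · exact Or.inr ⟨hl, hp⟩

theorem passes_eq (a c : List Int) (i : Int) (p : Bool) :
    a.foldl (fun p e => if ¬ ((i + e) ∈ c) then false else p) p =
      (p && a.all (fun e => decide ((i + e) ∈ c))) := by
  induction a generalizing p with
  | nil => simp
  | cons e t ih =>
    simp only [List.foldl_cons, List.all_cons, ih]
    by_cases h : (i + e) ∈ c <;> simp [h]

theorem mem_foldl_filter (l : List Int) (q : Int → Int → Bool) (init : List Int) (x : Int) :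
    x ∈ l.foldl (fun cd e => cd.filter (fun b => q b e)) init ↔
      x ∈ init ∧ ∀ e ∈ l, q x e := by
  induction l generalizing init with
  | nil => simp
  | cons e t ih =>
    simp only [List.foldl_cons, ih, List.mem_filter]
    constructor
    · rintro ⟨⟨hi, hq⟩, ht⟩
      exact ⟨hi, by simpa [hq] using ht⟩
    · rintro ⟨hi, hall⟩
      exact ⟨⟨hi, hall e (by simp)⟩, fun e' he' => hall e' (by simp [he'])⟩

-- ===== VERDICT (by name: the statement is the Claim_ definition above) =====
theorem calculate_spec : Claim_equal_calculate := by
  intro n m a c _ hpre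
  obtain ⟨ha, hc⟩ := hpre
  obtain ⟨a0, arest, rfl⟩ : ∃ a0 arest, a = a0 :: arest := by
    cases a with
    | nil => exact absurd rfl ha
    | cons a0 t => exact ⟨a0, t, rfl⟩
  obtain ⟨c0, crest, rfl⟩ : ∃ c0 crest, c = c0 :: crest := by
    cases c with
    | nil => exact absurd rfl hc
    | cons c0 t => exact ⟨c0, t, rfl⟩
  unfold Spec_calculate calculate calculate_alt
  rw [PySem.List.max?_id_cons, PySem.List.max?_id_cons,
    PySem.List.min?_id_cons, PySem.List.min?_id_cons]
  simp only
  set smallest := |arest.foldl min a0 - crest.foldl min c0|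
  set biggest := |arest.foldl max a0 - crest.foldl max c0|
  -- both sides are sorted lists of Nodup lists: reduce to membership equality
  apply PySem.List.sorted_eq_sorted_of_perm _ _ _ (fun x y h => h)
  have hinit : (PySem.Set.add (PySem.Set.add (PySem.Set.empty (α := Int)) smallest) biggest).Nodup :=
    PySem.Set.nodup_add _ _ (PySem.Set.nodup_add _ _ List.nodup_nil)
  rw [List.perm_ext_iff_of_nodup]
  · intro x
    rw [mem_foldl_add _ (fun i =>
        ((a0 :: arest).foldl (fun p e => if ¬ ((i + e) ∈ (c0 :: crest)) then false else p) true) = true),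
      mem_foldl_add _ (fun b => smallest < b ∧ b < biggest),
      mem_foldl_filter, passes_eq]
    simp only [PySem.Set.mem_add, PySem.Set.empty, PySem.List.mem_pyRange_one,
      PySem.Set.mem_ofList, List.mem_map, List.all_eq_true, decide_eq_true_eq,
      Bool.true_and, List.mem_cons, List.mem_nil_iff, false_or]
    constructor
    · rintro ((h1 | h1) | ⟨⟨hlo, hhi⟩, hall⟩)
      · exact Or.inl (Or.inl h1)
      · exact Or.inl (Or.inr h1)
      · refine Or.inr ⟨⟨⟨x + a0, hall a0 (Or.inl rfl), by ring⟩,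
          fun e he => hall e (Or.inr he)⟩, by omega, hhi⟩
    · rintro ((h1 | h1) | ⟨⟨⟨y, hy, hxy⟩, hrest⟩, hlo, hhi⟩)
      · exact Or.inl (Or.inl h1)
      · exact Or.inl (Or.inr h1)
      · refine Or.inr ⟨⟨by omega, hhi⟩, ?_⟩
        rintro e (rfl | he)
        · have h2 : x + e = y := by omega
          exact h2 ▸ hy
        · exact hrest e he
  · exact nodup_foldl_add _ _ _ hinit
  · exact nodup_foldl_add _ _ _ hinit
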